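-- pv_equiv track=rewrite | github.com/BushraBashir901/CareerConnect-System | app/services/chatbot_tools/message_parser.py | _extract_interview_info
-- ===== SOURCE A (Python) =====
-- from typing import Dict, Any, Tuple
--
-- def _extract_interview_info(message: str) -> Dict[str, Any]:
--     """Extract interview information from message"""
--     info = {
--         "job_title": None,
--         "company_type": None,
--         "interview_type": None,
--         "experience_level": None
--     }
--
--     # Extract job title (simplified pattern matching)
--     job_titles = [
--         "software engineer", "developer", "data scientist", "product manager",
--         "designer", "analyst", "consultant", "manager", "engineer"
--     ]
--
--     message_lower = message.lower()
--     for title in job_titles: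
--         if title in message_lower:
--             info["job_title"] = title
--             break
--
--     # Extract company type
--     if "startup" in message_lower:
--         info["company_type"] = "startup"
--     elif "enterprise" in message_lower or "large company" in message_lower:
--         info["company_type"] = "enterprise"
--
--     # Extract interview type
--     if "technical" in message_lower:
--         info["interview_type"] = "technical"
--     elif "behavioral" in message_lower:
--         info["interview_type"] = "behavioral"
--
--     # Extract experience level
--     levels = ["entry level", "junior", "mid level", "senior", "lead", "principal"]
--     for level in levels:
--         if level in message_lower:
--             info["experience_level"] = level
--             break
--
--     return info
-- ===== SOURCE B (Python) =====
-- # All keywords the extractor can ever react to (any order; matching is position-based).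
-- _ALL_KEYWORDS = [
--     "software engineer", "developer", "data scientist", "product manager",
--     "designer", "analyst", "consultant", "manager", "engineer",
--     "startup", "enterprise", "large company",
--     "technical", "behavioral",
--     "entry level", "junior", "mid level", "senior", "lead", "principal",
-- ]
--
-- _JOB_TITLES = ["software engineer", "developer", "data scientist", "product manager",
--                "designer", "analyst", "consultant", "manager", "engineer"]
-- _LEVELS = ["entry level", "junior", "mid level", "senior", "lead", "principal"]
--
--
-- def _extract_interview_info(message: str):
--     """Extract interview information from message.
--
--     Strategy: one sweep over the lowercased message collecting the SET of
--     keywords that occur anywhere (prefix check at each position), then each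
--     field is resolved by pure membership tests on that set.
--     """
--     ml = message.lower()
--     found = set()
--     for i in range(len(ml)):
--         for kw in _ALL_KEYWORDS:
--             if ml.startswith(kw, i):
--                 found.add(kw)
--
--     job_title = next((t for t in _JOB_TITLES if t in found), None)
--
--     if "startup" in found:
--         company_type = "startup"
--     elif "enterprise" in found or "large company" in found:
--         company_type = "enterprise"
--     else:
--         company_type = None
--
--     if "technical" in found:
--         interview_type = "technical"
--     elif "behavioral" in found:
--         interview_type = "behavioral"
--     else:
--         interview_type = None
--
--     experience_level = next((l for l in _LEVELS if l in found), None)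
--
--     return {
--         "job_title": job_title,
--         "company_type": company_type,
--         "interview_type": interview_type,
--         "experience_level": experience_level,
--     }
-- ===== Notes on version B (the rewrite author's own statement) =====
-- stated objective: alternative
-- what changed: Instead of A's per-field substring searches (two first-match loops plus two if/elif chains each calling 'in' on the message), B makes one sweep over the lowercased message collecting the set of all keywords that occur (prefix check at each position), then resolves each field by membership tests on that set.
import Mathlib
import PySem

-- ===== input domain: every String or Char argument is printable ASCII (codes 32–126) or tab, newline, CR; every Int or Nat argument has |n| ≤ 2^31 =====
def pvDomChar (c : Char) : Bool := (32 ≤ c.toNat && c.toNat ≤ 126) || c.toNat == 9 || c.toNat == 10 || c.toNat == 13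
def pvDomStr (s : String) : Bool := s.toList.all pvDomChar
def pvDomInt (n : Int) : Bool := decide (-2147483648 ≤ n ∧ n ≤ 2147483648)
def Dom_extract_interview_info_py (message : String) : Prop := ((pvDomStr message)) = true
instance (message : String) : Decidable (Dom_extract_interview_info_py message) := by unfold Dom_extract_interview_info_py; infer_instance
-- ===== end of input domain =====

-- B replaces A's four per-field substring searches by one sweep over the message that collects
-- the set of occurring keywords, then pure membership lookups per field (objective: alternative).


-- ===== PORT A =====
-- 'for title in job_titles: if title in message_lower: info["job_title"] = title; break'
def pvTitleLoop (ml : List Char) (titles : List String)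
    (info : PySem.Dict String (Option String)) : PySem.Dict String (Option String) :=
  match titles with
  | [] => info
  | t :: rest =>
      if PySem.Chars.isIn t.toList ml then info.insert "job_title" (some t)
      else pvTitleLoop ml rest info

-- 'for level in levels: if level in message_lower: info["experience_level"] = level; break'
def pvLevelLoop (ml : List Char) (levels : List String)
    (info : PySem.Dict String (Option String)) : PySem.Dict String (Option String) :=
  match levels with
  | [] => info
  | l :: rest =>
      if PySem.Chars.isIn l.toList ml then info.insert "experience_level" (some l)
      else pvLevelLoop ml rest info

def extract_interview_info_py (message : String) : List (String × Option String) :=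
  let info : PySem.Dict String (Option String) :=
    PySem.Dict.ofList [("job_title", none), ("company_type", none),
                       ("interview_type", none), ("experience_level", none)]
  let job_titles : List String :=
    ["software engineer", "developer", "data scientist", "product manager",
     "designer", "analyst", "consultant", "manager", "engineer"]
  let ml := PySem.Chars.lower message.toList
  let info := pvTitleLoop ml job_titles info
  let info :=
    if PySem.Chars.isIn "startup".toList ml then info.insert "company_type" (some "startup")
    else if PySem.Chars.isIn "enterprise".toList ml || PySem.Chars.isIn "large company".toList ml then
      info.insert "company_type" (some "enterprise")
    else info
  let info :=
    if PySem.Chars.isIn "technical".toList ml then info.insert "interview_type" (some "technical")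
    else if PySem.Chars.isIn "behavioral".toList ml then info.insert "interview_type" (some "behavioral")
    else info
  let levels : List String :=
    ["entry level", "junior", "mid level", "senior", "lead", "principal"]
  let info := pvLevelLoop ml levels info
  info.items

-- ===== PORT B =====
-- Source B's module constants
def pvAllKeywords : List String :=
  ["software engineer", "developer", "data scientist", "product manager",
   "designer", "analyst", "consultant", "manager", "engineer",
   "startup", "enterprise", "large company",
   "technical", "behavioral",
   "entry level", "junior", "mid level", "senior", "lead", "principal"]

def pvJobTitles : List String :=
  ["software engineer", "developer", "data scientist", "product manager",
   "designer", "analyst", "consultant", "manager", "engineer"]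

def pvLevels : List String :=
  ["entry level", "junior", "mid level", "senior", "lead", "principal"]

-- the sweep: 'for i in range(len(ml)): for kw in _ALL_KEYWORDS: if ml.startswith(kw, i): found.add(kw)'
def pvFound (ml : List Char) : PySem.Set String :=
  (List.range ml.length).foldl
    (fun s i =>
      pvAllKeywords.foldl
        (fun s kw => if kw.toList.isPrefixOf (ml.drop i) then PySem.Set.add s kw else s) s)
    PySem.Set.empty

def extract_interview_info_py_alt (message : String) : List (String × Option String) :=
  let ml := PySem.Chars.lower message.toList
  let found := pvFound ml
  let job_title := pvJobTitles.find? (fun t => PySem.Set.contains found t)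
  let company_type :=
    if PySem.Set.contains found "startup" then some "startup"
    else if PySem.Set.contains found "enterprise" || PySem.Set.contains found "large company" then
      some "enterprise"
    else none
  let interview_type :=
    if PySem.Set.contains found "technical" then some "technical"
    else if PySem.Set.contains found "behavioral" then some "behavioral"
    else none
  let experience_level := pvLevels.find? (fun l => PySem.Set.contains found l)
  [("job_title", job_title), ("company_type", company_type),
   ("interview_type", interview_type), ("experience_level", experience_level)]

-- ===== PRECONDITION & SPEC =====
def Spec_extract_interview_info_py (message : String) (out : List (String × Option String)) : Prop := out = extract_interview_info_py_alt message
instance (message : String) (out : List (String × Option String)) : Decidable (Spec_extract_interview_info_py message out) := by unfold Spec_extract_interview_info_py; infer_instance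

-- ===== CLAIM (what is proved, stated in full; the proofs are below) =====
def Claim_equal_extract_interview_info_py : Prop := ∀ (message : String), Dom_extract_interview_info_py message → Spec_extract_interview_info_py message (extract_interview_info_py message)

-- ===== LEMMAS AND PROOFS =====

-- A's loops set their key to the first matching candidate, if any.
theorem pvTitleLoop_eq (ml : List Char) (titles : List String)
    (info : PySem.Dict String (Option String)) :
    pvTitleLoop ml titles info =
      match titles.find? (fun t => PySem.Chars.isIn t.toList ml) with
      | some t => info.insert "job_title" (some t)
      | none => info := by
  induction titles with
  | nil => rfl
  | cons t rest ih =>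
      by_cases h : PySem.Chars.isIn t.toList ml
      · simp [pvTitleLoop, List.find?, h]
      · simp only [pvTitleLoop, List.find?, h, Bool.false_eq_true, ite_false]
        simpa [h] using ih

theorem pvLevelLoop_eq (ml : List Char) (levels : List String)
    (info : PySem.Dict String (Option String)) :
    pvLevelLoop ml levels info =
      match levels.find? (fun l => PySem.Chars.isIn l.toList ml) with
      | some l => info.insert "experience_level" (some l)
      | none => info := by
  induction levels with
  | nil => rfl
  | cons l rest ih =>
      by_cases h : PySem.Chars.isIn l.toList ml
      · simp [pvLevelLoop, List.find?, h]
      · simp only [pvLevelLoop, List.find?, h, Bool.false_eq_true, ite_false]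
        simpa [h] using ih

-- membership in the inner fold of the sweep
theorem pvMem_inner (ml : List Char) (i : Nat) (x : String) :
    ∀ (kws : List String) (s : PySem.Set String),
    x ∈ kws.foldl
        (fun s kw => if kw.toList.isPrefixOf (ml.drop i) then PySem.Set.add s kw else s) s ↔
      x ∈ s ∨ (x ∈ kws ∧ x.toList.isPrefixOf (ml.drop i)) := by
  intro kws
  induction kws with
  | nil => simp
  | cons k rest ih =>
      intro s
      by_cases h : k.toList.isPrefixOf (ml.drop i)
      · simp only [List.foldl, h, if_true, ih, PySem.Set.mem_add, List.mem_cons]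
        constructor
        · rintro ((hs | rfl) | ⟨hm, hp⟩)
          · exact Or.inl hs
          · exact Or.inr ⟨Or.inl rfl, h⟩
          · exact Or.inr ⟨Or.inr hm, hp⟩
        · rintro (hs | ⟨(rfl | hm), hp⟩)
          · exact Or.inl (Or.inl hs)
          · exact Or.inl (Or.inr rfl)
          · exact Or.inr ⟨hm, hp⟩
      · simp only [List.foldl, h, ih, List.mem_cons]
        constructor
        · rintro (hs | ⟨hm, hp⟩)
          · exact Or.inl hs
          · exact Or.inr ⟨Or.inr hm, hp⟩
        · rintro (hs | ⟨(rfl | hm), hp⟩)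
          · exact Or.inl hs
          · exact absurd hp h
          · exact Or.inr ⟨hm, hp⟩

-- membership in the whole sweep
theorem pvMem_found (ml : List Char) (x : String) :
    x ∈ pvFound ml ↔ ∃ i ∈ List.range ml.length, x ∈ pvAllKeywords ∧ x.toList.isPrefixOf (ml.drop i) := by
  unfold pvFound
  generalize List.range ml.length = l
  suffices h : ∀ (l : List Nat) (s : PySem.Set String),
      x ∈ l.foldl
          (fun s i => pvAllKeywords.foldl
            (fun s kw => if kw.toList.isPrefixOf (ml.drop i) then PySem.Set.add s kw else s) s) s ↔
        x ∈ s ∨ ∃ i ∈ l, x ∈ pvAllKeywords ∧ x.toList.isPrefixOf (ml.drop i) by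
    simpa [PySem.Set.empty] using h l PySem.Set.empty
  intro l
  induction l with
  | nil => simp
  | cons i rest ih =>
      intro s
      simp only [List.foldl, ih, pvMem_inner, List.mem_cons]
      constructor
      · rintro ((hs | ⟨hm, hp⟩) | ⟨j, hj, hm, hp⟩)
        · exact Or.inl hs
        · exact Or.inr ⟨i, Or.inl rfl, hm, hp⟩
        · exact Or.inr ⟨j, Or.inr hj, hm, hp⟩
      · rintro (hs | ⟨j, (rfl | hj), hm, hp⟩)
        · exact Or.inl (Or.inl hs)
        · exact Or.inl (Or.inr ⟨hm, hp⟩)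
        · exact Or.inr ⟨j, hj, hm, hp⟩

-- 'kw in found' equals 'kw in message_lower' for every nonempty registered keyword
theorem pvContains_found (ml : List Char) (kw : String)
    (hk : kw ∈ pvAllKeywords) (hne : kw.toList ≠ []) :
    PySem.Set.contains (pvFound ml) kw = PySem.Chars.isIn kw.toList ml := by
  rw [Bool.eq_iff_iff, PySem.Set.contains_iff, pvMem_found,
    ← PySem.Chars.exists_prefix_drop_iff_isIn]
  constructor
  · rintro ⟨i, _, _, hp⟩
    exact ⟨i, List.isPrefixOf_iff_prefix.mp hp⟩
  · rintro ⟨j, hp⟩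
    by_cases hj : j < ml.length
    · exact ⟨j, List.mem_range.mpr hj, hk, List.isPrefixOf_iff_prefix.mpr hp⟩
    · exfalso
      rw [List.drop_eq_nil_of_le (Nat.le_of_not_lt hj)] at hp
      exact hne (List.prefix_nil.mp hp)

-- find? only depends on the predicate's values on the list
theorem pvFind?_ext {α : Type} (p q : α → Bool) :
    ∀ (l : List α), (∀ a ∈ l, p a = q a) → l.find? p = l.find? q := by
  intro l
  induction l with
  | nil => intro _; rfl
  | cons a rest ih =>
      intro h
      simp only [List.find?, h a (List.mem_cons_self)]
      cases hq : q a
      · simpa [hq] using ih (fun b hb => h b (List.mem_cons_of_mem a hb))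
      · rfl

-- ===== VERDICT (by name: the statement is the Claim_ definition above) =====
theorem extract_interview_info_py_spec : Claim_equal_extract_interview_info_py := by
  intro message _
  unfold Spec_extract_interview_info_py
  set ml := PySem.Chars.lower message.toList with hml
  have hfind : ∀ l : List String, (∀ a ∈ l, a ∈ pvAllKeywords ∧ a.toList ≠ []) →
      l.find? (fun t => PySem.Set.contains (pvFound ml) t)
        = l.find? (fun t => PySem.Chars.isIn t.toList ml) := by
    intro l hl
    exact pvFind?_ext _ _ l (fun a ha => pvContains_found ml a (hl a ha).1 (hl a ha).2)
  simp only [extract_interview_info_py, extract_interview_info_py_alt, ← hml,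
    pvTitleLoop_eq, pvLevelLoop_eq,
    pvContains_found ml "startup" (by decide) (by decide),
    pvContains_found ml "enterprise" (by decide) (by decide),
    pvContains_found ml "large company" (by decide) (by decide),
    pvContains_found ml "technical" (by decide) (by decide),
    pvContains_found ml "behavioral" (by decide) (by decide),
    hfind pvJobTitles (by decide), hfind pvLevels (by decide)]
  cases hj : List.find? (fun t => PySem.Chars.isIn t.toList ml) pvJobTitles <;>
  cases hl : List.find? (fun l => PySem.Chars.isIn l.toList ml) pvLevels <;>
  by_cases h1 : PySem.Chars.isIn "startup".toList ml <;>
  by_cases h2 : PySem.Chars.isIn "enterprise".toList ml <;>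
  by_cases h3 : PySem.Chars.isIn "large company".toList ml <;>
  by_cases h4 : PySem.Chars.isIn "technical".toList ml <;>
  by_cases h5 : PySem.Chars.isIn "behavioral".toList ml <;>
  simp only [pvJobTitles, pvLevels] at hj hl <;>
  simp only [hj, hl, h1, h2, h3, h4, h5, Bool.false_or, Bool.true_or,
    Bool.false_eq_true, if_true, if_false] <;>
  rfl
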